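-- pv_equiv track=rewrite | github.com/doudoukiss/Blink-Eye | src/blink/interaction/barge_in.py | _safe_reason_codes
-- ===== SOURCE A (Python) =====
-- def _safe_reason_codes(values: tuple[str, ...]) -> list[str]:
--     result: list[str] = []
--     seen: set[str] = set()
--     for value in values:
--         text = str(value or "").strip()[:96]
--         if not text or text in seen:
--             continue
--         seen.add(text)
--         result.append(text)
--         if len(result) >= 16:
--             break
--     return result
-- ===== SOURCE B (Python) =====
-- def _safe_reason_codes(values):
--     # Selection-style: repeatedly take the first non-empty sanitized text and
--     # purge its duplicates from the remaining work list; no seen-set needed.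
--     texts = [str(v or "").strip()[:96] for v in values]
--     out = []
--     k = 16
--     while texts and k:
--         head, texts = texts[0], texts[1:]
--         if head:
--             out.append(head)
--             k -= 1
--             texts = [t for t in texts if t != head]
--     return out
-- ===== Notes on version B (the rewrite author's own statement) =====
-- stated objective: alternative
-- what changed: Replaces A's seen-set membership test and early break with a selection-style work-list: sanitize all values once, then repeatedly take the first non-empty text and purge its duplicates from the remaining work list (no seen set), counting down a cap of 16.
import Mathlib
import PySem

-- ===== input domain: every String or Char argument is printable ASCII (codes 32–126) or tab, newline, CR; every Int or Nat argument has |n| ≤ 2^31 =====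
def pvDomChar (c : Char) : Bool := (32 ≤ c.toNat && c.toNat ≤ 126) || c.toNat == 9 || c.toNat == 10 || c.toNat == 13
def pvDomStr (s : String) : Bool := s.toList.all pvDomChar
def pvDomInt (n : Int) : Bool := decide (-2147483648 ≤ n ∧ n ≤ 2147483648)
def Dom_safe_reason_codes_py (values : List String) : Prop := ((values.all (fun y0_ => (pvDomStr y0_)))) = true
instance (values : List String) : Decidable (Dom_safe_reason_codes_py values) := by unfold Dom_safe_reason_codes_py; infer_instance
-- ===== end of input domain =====

-- B replaces A's seen-set/early-break loop by a selection-style work list: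
-- take the first non-empty sanitized text, purge its duplicates from the rest, cap countdown 16 (alternative).

-- ===== PORT A =====
-- text = str(value or "").strip()[:96]
def pvSanitize (v : String) : String :=
  PySem.Str.slice (PySem.Str.strip (if v = "" then "" else v)) none (some 96)

def pvGoA : List String → List String → PySem.Set String → List String
  | [], result, _ => result
  | v :: rest, result, seen =>
    let text := pvSanitize v
    if text = "" ∨ PySem.Set.contains seen text then
      pvGoA rest result seen
    else
      let result' := result ++ [text]
      if 16 ≤ result'.length then result'
      else pvGoA rest result' (PySem.Set.add seen text)

def safe_reason_codes_py (values : List String) : List String :=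
  pvGoA values [] PySem.Set.empty

-- ===== PORT B =====
-- the while loop of Source B: texts is the shrinking work list, k the remaining cap;
-- out.append(head) becomes building the output front-first with cons
def pvGoB : Nat → List String → List String
  | _, [] => []
  | 0, _ :: _ => []
  | Nat.succ k, head :: texts =>
    if head = "" then pvGoB (Nat.succ k) texts
    else head :: pvGoB k (texts.filter (fun t => !(t == head)))
termination_by _ texts => texts.length
decreasing_by
  · simp
  · simpa using (List.length_filter_le _ _).trans (List.length_attach ..).le

def safe_reason_codes_py_alt (values : List String) : List String :=
  pvGoB 16 (values.map pvSanitize)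

-- ===== PRECONDITION & SPEC =====
def Spec_safe_reason_codes_py (values : List String) (out : List String) : Prop := out = safe_reason_codes_py_alt values
instance (values : List String) (out : List String) : Decidable (Spec_safe_reason_codes_py values out) := by unfold Spec_safe_reason_codes_py; infer_instance

-- ===== CLAIM (what is proved, stated in full; the proofs are below) =====
def Claim_equal_safe_reason_codes_py : Prop := ∀ (values : List String), Dom_safe_reason_codes_py values → Spec_safe_reason_codes_py values (safe_reason_codes_py values)

-- ===== LEMMAS AND PROOFS =====

-- filter-style first-occurrence dedup (proof-side normal form both loops reduce to)
def pvDedupF : List String → List String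
  | [] => []
  | x :: xs => x :: pvDedupF (xs.filter (fun t => !(t == x)))
termination_by l => l.length
decreasing_by simpa using (List.length_filter_le _ _).trans (List.length_attach ..).le

theorem pvDedupF_nil : pvDedupF [] = [] := by rw [pvDedupF]
theorem pvDedupF_cons (x : String) (xs : List String) :
    pvDedupF (x :: xs) = x :: pvDedupF (xs.filter (fun t => !(t == x))) := by rw [pvDedupF]

-- Set.update only appends elements
theorem pvUpdate_append (s : PySem.Set String) (xs : List String) :
    ∃ t, PySem.Set.update s xs = s ++ t := by
  induction xs generalizing s with
  | nil => exact ⟨[], by simp [PySem.Set.update]⟩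
  | cons x xs ih =>
    obtain ⟨t, ht⟩ := ih (PySem.Set.add s x)
    simp only [PySem.Set.update, List.foldl_cons]
    simp only [PySem.Set.update] at ht
    unfold PySem.Set.add at ht ⊢
    by_cases hc : PySem.Set.contains s x = true
    · rw [if_pos hc] at ht ⊢; exact ⟨t, ht⟩
    · rw [if_neg hc] at ht ⊢; exact ⟨x :: t, ht.trans (List.append_assoc ..)⟩

-- A's loop with seen = result equals dedup-then-cap
theorem pvGoA_eq (l : List String) (res : List String) (hlen : res.length < 16) :
    pvGoA l res res =
      List.take 16 (PySem.Set.update res ((l.map pvSanitize).filter (fun t => !(t == "")))) := by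
  induction l generalizing res with
  | nil =>
    simp [pvGoA, PySem.Set.update, List.take_of_length_le (Nat.le_of_lt hlen)]
  | cons v rest ih =>
    simp only [pvGoA, List.map_cons, List.filter_cons]
    by_cases he : pvSanitize v = ""
    · simp [he, ih res hlen]
    · have hne : (!(pvSanitize v == "")) = true := by simp [he]
      simp only [hne, if_pos]
      by_cases hc : PySem.Set.contains res (pvSanitize v) = true
      · have hres : PySem.Set.add res (pvSanitize v) = res := by
          unfold PySem.Set.add; rw [if_pos hc]
        simp only [he, hc, false_or, if_pos, PySem.Set.update, List.foldl_cons, hres]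
        exact ih res hlen
      · have hadd : PySem.Set.add res (pvSanitize v) = res ++ [pvSanitize v] := by
          unfold PySem.Set.add; rw [if_neg hc]
        have hcond : ¬ (pvSanitize v = "" ∨ PySem.Set.contains res (pvSanitize v) = true) := by
          push Not; exact ⟨he, by simpa using hc⟩
        simp only [if_neg hcond, PySem.Set.update, List.foldl_cons, hadd]
        by_cases h16 : 16 ≤ (res ++ [pvSanitize v]).length
        · have hlen' : (res ++ [pvSanitize v]).length = 16 := by
            simp at h16 ⊢; omega
          obtain ⟨t, ht⟩ := pvUpdate_append (res ++ [pvSanitize v]) (rest.map pvSanitize |>.filter (fun t => !(t == "")))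
          simp only [PySem.Set.update] at ht
          simp only [if_pos h16]
          rw [ht, List.take_append_of_le_length (by omega), List.take_of_length_le (by omega)]
        · have hlen' : (res ++ [pvSanitize v]).length < 16 := by omega
          simp only [if_neg h16]
          exact ih (res ++ [pvSanitize v]) hlen'

-- seen-set dedup (Set.update) equals filter dedup of the not-yet-seen elements
theorem pvUpdate_eq_dedupF (s : PySem.Set String) (l : List String) :
    PySem.Set.update s l = s ++ pvDedupF (l.filter (fun x => !(PySem.Set.contains s x))) := by
  induction hL : l.length using Nat.strong_induction_on generalizing s l with
  | _ n ih =>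
    cases l with
    | nil => simp [PySem.Set.update, pvDedupF_nil]
    | cons x xs =>
      simp only [PySem.Set.update, List.foldl_cons]
      by_cases hc : PySem.Set.contains s x = true
      · have hs : PySem.Set.add s x = s := by unfold PySem.Set.add; rw [if_pos hc]
        have h1 := ih xs.length (by simp [← hL]) s xs rfl
        simp only [PySem.Set.update] at h1
        have hmem : x ∈ s := by simpa [PySem.Set.contains] using hc
        rw [hs, h1, List.filter_cons_of_neg (by simp [PySem.Set.contains, hmem])]
      · have hs : PySem.Set.add s x = s ++ [x] := by unfold PySem.Set.add; rw [if_neg hc]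
        have h1 := ih xs.length (by simp [← hL]) (s ++ [x]) xs rfl
        simp only [PySem.Set.update] at h1
        have hpos : (!(PySem.Set.contains s x)) = true := by
          simp [PySem.Set.contains] at hc ⊢; exact hc
        rw [hs, h1, List.filter_cons_of_pos (p := fun y => !(PySem.Set.contains s y)) (l := xs) hpos,
            pvDedupF_cons, List.append_assoc, List.singleton_append]
        congr 2
        rw [List.filter_filter]
        congr 1
        apply List.filter_congr
        intro t _
        simp only [PySem.Set.contains, List.contains_append, List.contains_cons,
          List.contains_nil, Bool.or_false, Bool.not_or, Bool.and_comm]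

-- B's work-list loop equals dedup-then-cap
theorem pvGoB_eq (l : List String) (k : Nat) :
    pvGoB k l = List.take k (pvDedupF (l.filter (fun t => !(t == "")))) := by
  induction hL : l.length using Nat.strong_induction_on generalizing l k with
  | _ n ih =>
    cases l with
    | nil => cases k <;> simp [pvGoB, pvDedupF_nil]
    | cons x xs =>
      cases k with
      | zero => simp [pvGoB]
      | succ k =>
        rw [pvGoB]
        by_cases he : x = ""
        · have := ih xs.length (by simp [← hL]) xs (k+1) rfl
          simp [he, this]
        · have hx : (!(x == "")) = true := by simp [he]
          have := ih (xs.filter (fun t => !(t == x))).length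
            (by simpa [← hL] using Nat.lt_succ_of_le (List.length_filter_le _ _))
            (xs.filter (fun t => !(t == x))) k rfl
          simp only [if_neg he, this, List.filter_cons, hx, if_pos]
          rw [pvDedupF_cons, List.take_succ_cons]
          congr 2
          rw [List.filter_filter, List.filter_filter]
          congr 1
          apply List.filter_congr
          intro t _
          simp [Bool.and_comm]

-- ===== VERDICT (by name: the statement is the Claim_ definition above) =====
theorem safe_reason_codes_py_spec : Claim_equal_safe_reason_codes_py := by
  intro values _
  unfold Spec_safe_reason_codes_py safe_reason_codes_py safe_reason_codes_py_alt
  have he : (PySem.Set.empty : PySem.Set String) = ([] : List String) := rfl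
  rw [he, pvGoA_eq values [] (by simp), pvGoB_eq,
      pvUpdate_eq_dedupF [] ((values.map pvSanitize).filter (fun t => !(t == "")))]
  simp [PySem.Set.contains]
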